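-- pv_equiv track=rewrite | github.com/andrea5972/COMP-805 | labs/week4/lab4.py | filter_0_items
-- ===== SOURCE A (Python) =====
-- def filter_0_items(inventory):
--     """
--     Removes: item that have a vaule of 0 from a dictionary of inventories
--     inventory: dictionary with:
--         key: string that is the name of the inventory item
--         value: integers that equals the number of that item currently on hand
--     Returns: the same inventory_dic with any item that had quantity removed
--     """
--     new_inventory = [ ]
--
--     for item in inventory:
--         if inventory[item] ==0:
--             new_inventory.append(item)
--
--     for keys in new_inventory:
--         del inventory[keys]
--
--     return inventory
-- ===== SOURCE B (Python) =====
-- def filter_0_items(inventory):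
--     kept = {item: qty for item, qty in inventory.items() if qty != 0}
--     inventory.clear()
--     inventory.update(kept)
--     return inventory
-- ===== Notes on version B (the rewrite author's own statement) =====
-- stated objective: simpler
-- what changed: B builds the dict of items to keep in one comprehension and replaces the dict's contents via clear()+update(), instead of A's collect-zero-keys pass followed by a separate deletion loop.
import Mathlib
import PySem

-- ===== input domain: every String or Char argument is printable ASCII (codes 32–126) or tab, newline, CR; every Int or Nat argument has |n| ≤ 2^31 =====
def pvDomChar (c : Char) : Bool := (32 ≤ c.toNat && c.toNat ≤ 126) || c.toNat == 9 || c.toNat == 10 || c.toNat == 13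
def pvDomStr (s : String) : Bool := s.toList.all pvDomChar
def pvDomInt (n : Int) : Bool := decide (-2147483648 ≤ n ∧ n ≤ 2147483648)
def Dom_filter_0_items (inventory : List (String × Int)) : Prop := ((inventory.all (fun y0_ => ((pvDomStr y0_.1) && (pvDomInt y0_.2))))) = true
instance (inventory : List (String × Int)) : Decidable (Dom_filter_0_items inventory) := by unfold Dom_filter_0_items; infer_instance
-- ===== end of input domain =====

-- B replaces A's collect-zero-keys-then-delete loops by a single keep-comprehension whose result
-- replaces the dict's contents (clear+update); same asymptotic cost, simpler. Both Pythons mutate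
-- and return the SAME dict object; the theorem is about the returned value.


-- ===== PORT A =====
-- The Python argument is a dict; the association list is decoded with Dict.ofList (insertion
-- order, last value wins), the same decoding both ports use.
def filter_0_items (inventory : List (String × Int)) : List (String × Int) :=
  let d := PySem.Dict.ofList inventory
  -- new_inventory = []; for item in inventory: if inventory[item] == 0: new_inventory.append(item)
  let new_inventory := d.keys.foldl
    (fun acc item => if d.getD item 0 == 0 then acc ++ [item] else acc) []
  -- for keys in new_inventory: del inventory[keys]
  (new_inventory.foldl (fun dd keys => dd.erase keys) d).items

-- ===== PORT B =====
-- kept = {item: qty for item, qty in inventory.items() if qty != 0}; clear+update → kept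
def filter_0_items_alt (inventory : List (String × Int)) : List (String × Int) :=
  (PySem.Dict.ofList inventory).items.filter (fun p => p.2 != 0)

-- ===== PRECONDITION & SPEC =====
def Spec_filter_0_items (inventory : List (String × Int)) (out : List (String × Int)) : Prop := out = filter_0_items_alt inventory
instance (inventory : List (String × Int)) (out : List (String × Int)) : Decidable (Spec_filter_0_items inventory out) := by unfold Spec_filter_0_items; infer_instance

-- ===== CLAIM (what is proved, stated in full; the proofs are below) =====
def Claim_equal_filter_0_items : Prop := ∀ (inventory : List (String × Int)), Dom_filter_0_items inventory → Spec_filter_0_items inventory (filter_0_items inventory)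

-- ===== LEMMAS AND PROOFS =====

-- folding `erase` over a key list filters the items by "key not in the list"
theorem items_foldl_erase (ks : List String) (d : PySem.Dict String Int) :
    (ks.foldl (fun dd k => dd.erase k) d).items
      = d.items.filter (fun p => !ks.any (fun k => p.1 == k)) := by
  induction ks generalizing d with
  | nil => simp
  | cons k ks ih =>
      rw [List.foldl_cons, ih (d.erase k)]
      simp only [PySem.Dict.erase, List.filter_filter, List.any_cons]
      apply List.filter_congr
      intro p _
      cases p.1 == k <;> simp

theorem filter_0_items_spec' (inventory : List (String × Int)) :
    filter_0_items inventory = filter_0_items_alt inventory := by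
  show (List.foldl (fun dd keys => dd.erase keys) (PySem.Dict.ofList inventory)
          (List.foldl (fun acc item => if (PySem.Dict.ofList inventory).getD item 0 == 0 then acc ++ [item] else acc)
            [] (PySem.Dict.ofList inventory).keys)).items
      = (PySem.Dict.ofList inventory).items.filter (fun p => p.2 != 0)
  set d := PySem.Dict.ofList inventory with hd
  have hnd : d.keys.Nodup := PySem.Dict.nodup_keys_ofList inventory
  rw [PySem.List.foldl_append_if (fun item => d.getD item 0 == 0) (fun x => x) d.keys []]
  rw [items_foldl_erase]
  apply List.filter_congr
  intro p hp
  have hk : p.1 ∈ d.keys := PySem.Dict.mem_keys_of_mem_items d hp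
  have hv : d.getD p.1 0 = p.2 := by
    obtain ⟨a, b⟩ := p
    exact PySem.Dict.getD_of_mem_items d hp hnd 0
  simp only [List.map_id_fun', List.nil_append]
  by_cases h2 : p.2 = 0
  · simp [h2, hv, hk]
  · have hany : (d.keys.any fun a => d.getD a 0 == 0 && p.1 == a) = false := by
      rw [List.any_eq_false]
      intro a _
      simp only [Bool.and_eq_true, beq_iff_eq, not_and]
      intro hz hpa
      exact absurd (by rw [← hv, hpa, hz]) h2
    simp [h2, hany]

-- ===== VERDICT (by name: the statement is the Claim_ definition above) =====
theorem filter_0_items_spec : Claim_equal_filter_0_items := by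
  intro inventory _
  exact filter_0_items_spec' inventory
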